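-- pv_equiv track=rewrite | github.com/PLN-team/pyPLNmodels | tests/_create_readme_getting_started_and_docstrings_tests.py | _get_examples_docstring
-- ===== SOURCE A (Python) =====
-- def _get_examples_docstring(lines):
--     examples = []
--     in_example = False
--     example = []
--     for doc_line in lines:
--         doc_line = doc_line.lstrip()
--         if len(doc_line) > 3:
--             if doc_line[0:3] == ">>>":
--                 in_example = True
--                 example.append(doc_line[4:])
--             else:
--                 if in_example is True:
--                     examples.append(example)
--                     example = []
--                 in_example = False
--     return examples
-- ===== SOURCE B (Python) =====
-- from itertools import groupby
--
--
-- def _get_examples_docstring(lines):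
--     relevant = [s for s in (line.lstrip() for line in lines) if len(s) > 3]
--     examples = []
--     pending = None
--     for is_example, group in groupby(relevant, key=lambda s: s.startswith(">>>")):
--         if is_example:
--             pending = [s[4:] for s in group]
--         elif pending is not None:
--             examples.append(pending)
--             pending = None
--     return examples
-- ===== Notes on version B (the rewrite author's own statement) =====
-- stated objective: idiomatic
-- what changed: Replaces A's three-variable state machine (in_example flag, mutable current block) by a filter of the relevant stripped lines followed by itertools.groupby into maximal runs keyed on startswith('>>>'), with a single pending block flushed when a non-example run is met.
import Mathlib
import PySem

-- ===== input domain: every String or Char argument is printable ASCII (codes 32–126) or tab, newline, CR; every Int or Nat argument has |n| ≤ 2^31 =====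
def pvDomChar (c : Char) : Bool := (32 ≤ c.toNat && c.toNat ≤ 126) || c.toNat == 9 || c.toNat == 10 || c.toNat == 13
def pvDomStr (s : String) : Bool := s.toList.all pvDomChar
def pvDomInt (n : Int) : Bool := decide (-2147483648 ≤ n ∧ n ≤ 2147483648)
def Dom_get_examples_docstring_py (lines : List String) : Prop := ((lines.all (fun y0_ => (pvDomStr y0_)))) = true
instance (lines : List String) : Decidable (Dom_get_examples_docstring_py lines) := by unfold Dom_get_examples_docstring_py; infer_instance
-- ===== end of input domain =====

-- B replaces A's three-variable state machine by filter + groupby into maximal runs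
-- keyed on startswith(">>>"), flushing one pending block per non-example run (idiomatic).

-- ===== PORT A =====
-- one iteration of A's for-loop over the state (examples, in_example, example)
def pvAStep (st : List (List String) × Bool × List String) (doc_line : String) :
    List (List String) × Bool × List String :=
  let dl := PySem.Str.lstrip doc_line
  if 3 < PySem.Str.len dl then
    if PySem.Str.slice dl (some 0) (some 3) == ">>>" then
      (st.1, true, st.2.2 ++ [PySem.Str.slice dl (some 4) none])
    else
      if st.2.1 then (st.1 ++ [st.2.2], false, ([] : List String))
      else (st.1, false, st.2.2)
  else st

def get_examples_docstring_py (lines : List String) : List (List String) :=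
  (lines.foldl pvAStep ([], false, [])).1

-- ===== PORT B =====
def pvKey (s : String) : Bool := PySem.Str.startswith s ">>>"

-- itertools.groupby: split into maximal runs of equal key (hand-ported; exact)
def pvGroupBy (key : String → Bool) : List String → List (Bool × List String)
  | [] => []
  | x :: xs =>
    let p := xs.span (fun y => key y == key x)
    (key x, x :: p.1) :: pvGroupBy key p.2
termination_by l => l.length
decreasing_by
  simp only [List.span_eq_takeWhile_dropWhile]
  exact Nat.lt_succ_of_le (List.length_dropWhile_le _ _)

-- B's for-loop over the groups, carrying the pending block
def pvBLoop : List (Bool × List String) → Option (List String) → List (List String)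
  | [], _ => []
  | (true, g) :: rest, _ =>
      pvBLoop rest (some (g.map (fun s => PySem.Str.slice s (some 4) none)))
  | (false, _) :: rest, pending =>
      match pending with
      | some p => p :: pvBLoop rest none
      | none => pvBLoop rest none

def get_examples_docstring_py_alt (lines : List String) : List (List String) :=
  pvBLoop
    (pvGroupBy pvKey
      ((lines.map PySem.Str.lstrip).filter (fun s => 3 < PySem.Str.len s))) none

-- ===== PRECONDITION & SPEC =====
def Spec_get_examples_docstring_py (lines : List String) (out : List (List String)) : Prop := out = get_examples_docstring_py_alt lines
instance (lines : List String) (out : List (List String)) : Decidable (Spec_get_examples_docstring_py lines out) := by unfold Spec_get_examples_docstring_py; infer_instance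

-- ===== CLAIM (what is proved, stated in full; the proofs are below) =====
def Claim_equal_get_examples_docstring_py : Prop := ∀ (lines : List String), Dom_get_examples_docstring_py lines → Spec_get_examples_docstring_py lines (get_examples_docstring_py lines)

-- ===== LEMMAS AND PROOFS =====

def pvTail4 (s : String) : String := PySem.Str.slice s (some 4) none

-- reference recursion on the filtered stripped lines (proof-only)
mutual
def pvRefF (key : String → Bool) : List String → List (List String)
  | [] => []
  | x :: xs => if key x then pvRefT key xs [pvTail4 x] else pvRefF key xs
def pvRefT (key : String → Bool) : List String → List String → List (List String)
  | [], _ => []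
  | x :: xs, acc => if key x then pvRefT key xs (acc ++ [pvTail4 x]) else acc :: pvRefF key xs
end

def pvFiltered (lines : List String) : List String :=
  (lines.map PySem.Str.lstrip).filter (fun s => 3 < PySem.Str.len s)

theorem pvKey_eq (s : String) :
    (PySem.Str.slice s (some 0) (some 3) == ">>>") = pvKey s := by
  unfold pvKey
  rw [Bool.eq_iff_iff, beq_iff_eq]
  rw [show PySem.Str.slice s (some 0) (some 3) = ">>>" ↔ (PySem.Str.slice s (some 0) (some 3)).toList = ">>>".toList from ⟨fun h => h ▸ rfl, fun h => String.toList_inj.mp h⟩]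
  simp [PySem.Str.toList_slice, PySem.Chars.startswith_iff]
  rw [PySem.List.slice_to _ (by norm_num), List.prefix_iff_eq_take]
  norm_num [eq_comm]
  rfl

theorem pvFiltered_cons (l : String) (ls : List String) :
    pvFiltered (l :: ls) = if 3 < PySem.Str.len (PySem.Str.lstrip l)
      then PySem.Str.lstrip l :: pvFiltered ls else pvFiltered ls := by
  simp only [pvFiltered, List.map_cons, List.filter_cons]
  split <;> simp_all

theorem pvA_ref : ∀ (lines : List String) (exs : List (List String)) (ex : List String),
    ((lines.foldl pvAStep (exs, true, ex)).1 = exs ++ pvRefT pvKey (pvFiltered lines) ex)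
    ∧ ((lines.foldl pvAStep (exs, false, [])).1 = exs ++ pvRefF pvKey (pvFiltered lines)) := by
  intro lines
  induction lines with
  | nil => intro exs ex; simp [pvFiltered, pvRefT, pvRefF]
  | cons l ls ih =>
    intro exs ex
    rw [pvFiltered_cons]
    simp only [List.foldl_cons]
    by_cases h : 3 < PySem.Str.len (PySem.Str.lstrip l)
    · rw [if_pos h]
      have hk := pvKey_eq (PySem.Str.lstrip l)
      cases hkey : pvKey (PySem.Str.lstrip l) with
      | true =>
        rw [hkey] at hk
        constructor
        · rw [show pvAStep (exs, true, ex) l = (exs, true, ex ++ [pvTail4 (PySem.Str.lstrip l)]) from by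
            simp only [pvAStep]; rw [if_pos h]; simp [hk, pvTail4]]
          rw [(ih exs (ex ++ [pvTail4 (PySem.Str.lstrip l)])).1]
          simp [pvRefT, hkey]
        · rw [show pvAStep (exs, false, ([] : List String)) l = (exs, true, [pvTail4 (PySem.Str.lstrip l)]) from by
            simp only [pvAStep]; rw [if_pos h]; simp [hk, pvTail4]]
          rw [(ih exs [pvTail4 (PySem.Str.lstrip l)]).1]
          simp [pvRefF, hkey]
      | false =>
        rw [hkey] at hk
        constructor
        · rw [show pvAStep (exs, true, ex) l = (exs ++ [ex], false, ([] : List String)) from by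
            simp only [pvAStep]; rw [if_pos h]; simp [hk]]
          rw [(ih (exs ++ [ex]) []).2]
          simp [pvRefT, hkey]
        · rw [show pvAStep (exs, false, ([] : List String)) l = (exs, false, ([] : List String)) from by
            simp only [pvAStep]; rw [if_pos h]; simp [hk]]
          rw [(ih exs []).2]
          simp [pvRefF, hkey]
    · rw [if_neg h]
      rw [show pvAStep (exs, true, ex) l = (exs, true, ex) from by simp only [pvAStep]; rw [if_neg h],
          show pvAStep (exs, false, ([] : List String)) l = (exs, false, ([] : List String)) from by simp only [pvAStep]; rw [if_neg h]]
      exact ih exs ex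

theorem pvRefF_append_nonkey (key : String → Bool) (run rest : List String)
    (h : ∀ y ∈ run, key y = false) :
    pvRefF key (run ++ rest) = pvRefF key rest := by
  induction run with
  | nil => rfl
  | cons a l ih =>
    simp only [List.cons_append, pvRefF, h a (by simp)]
    exact ih (fun y hy => h y (by simp [hy]))

theorem pvRefT_append_key (key : String → Bool) (run : List String) :
    ∀ (rest acc : List String), (∀ y ∈ run, key y = true) →
    pvRefT key (run ++ rest) acc = pvRefT key rest (acc ++ run.map pvTail4) := by
  induction run with
  | nil => intro rest acc _; simp
  | cons a l ih =>
    intro rest acc h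
    simp only [List.cons_append, pvRefT, h a (by simp), if_true, List.map_cons]
    rw [ih rest (acc ++ [pvTail4 a]) (fun y hy => h y (by simp [hy]))]
    simp

theorem pvDropWhile_head {α : Type} (p : α → Bool) :
    ∀ (xs : List α) (y : α) (l : List α), xs.dropWhile p = y :: l → p y = false := by
  intro xs
  induction xs with
  | nil => intro y l h; simp [List.dropWhile] at h
  | cons a as ih =>
    intro y l h
    by_cases hp : p a
    · rw [List.dropWhile_cons_of_pos hp] at h; exact ih y l h
    · rw [List.dropWhile_cons_of_neg (by simpa using hp)] at h
      rcases h with ⟨rfl, rfl⟩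
      simpa using hp

theorem pvGroupBy_nil (key : String → Bool) : pvGroupBy key [] = [] := by
  rw [pvGroupBy.eq_def]

theorem pvGroupBy_cons (key : String → Bool) (x : String) (xs : List String) :
    pvGroupBy key (x :: xs) =
      (key x, x :: xs.takeWhile (fun y => key y == key x)) ::
        pvGroupBy key (xs.dropWhile (fun y => key y == key x)) := by
  rw [pvGroupBy.eq_def]
  simp [List.span_eq_takeWhile_dropWhile]

theorem pvRefF_nil (key : String → Bool) : pvRefF key [] = [] := by
  rw [pvRefF]

theorem pvRefT_nil (key : String → Bool) (acc : List String) : pvRefT key [] acc = [] := by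
  rw [pvRefT]

theorem pvRefF_cons_false (key : String → Bool) {x : String} (hx : key x = false)
    (xs : List String) : pvRefF key (x :: xs) = pvRefF key xs := by
  rw [pvRefF, hx]; simp

theorem pvRefF_cons_true (key : String → Bool) {x : String} (hx : key x = true)
    (xs : List String) : pvRefF key (x :: xs) = pvRefT key xs [pvTail4 x] := by
  rw [pvRefF, hx]; simp

theorem pvRefT_cons_false (key : String → Bool) {y : String} (hy : key y = false)
    (rest acc : List String) : pvRefT key (y :: rest) acc = acc :: pvRefF key rest := by
  rw [pvRefT, hy]; simp

theorem pvB_ref : ∀ (n : Nat) (xs : List String), xs.length ≤ n →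
    pvBLoop (pvGroupBy pvKey xs) none = pvRefF pvKey xs := by
  intro n
  induction n with
  | zero =>
    intro xs h
    have : xs = [] := List.eq_nil_of_length_eq_zero (Nat.le_zero.mp h)
    subst this
    rw [pvGroupBy_nil, pvRefF_nil]; rfl
  | succ n ih =>
    intro xs h
    cases xs with
    | nil => rw [pvGroupBy_nil, pvRefF_nil]; rfl
    | cons x xs' =>
      have hlen : xs'.length ≤ n := by simpa using h
      rw [pvGroupBy_cons]
      cases hkx : pvKey x with
      | false =>
        simp only [pvBLoop]
        rw [ih _ (le_trans (List.length_dropWhile_le _ _) hlen)]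
        have hall : ∀ y ∈ xs'.takeWhile (fun y => pvKey y == false), pvKey y = false := by
          intro y hy; simpa using List.mem_takeWhile_imp hy
        rw [pvRefF_cons_false _ hkx]
        conv_rhs => rw [← List.takeWhile_append_dropWhile (p := fun y => pvKey y == false) (l := xs')]
        rw [pvRefF_append_nonkey _ _ _ hall]
      | true =>
        simp only [pvBLoop]
        have hall : ∀ y ∈ xs'.takeWhile (fun y => pvKey y == true), pvKey y = true := by
          intro y hy; simpa using List.mem_takeWhile_imp hy
        rw [pvRefF_cons_true _ hkx]
        conv_rhs => rw [← List.takeWhile_append_dropWhile (p := fun y => pvKey y == true) (l := xs')]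
        rw [pvRefT_append_key _ _ _ _ hall]
        have hrestlen : (xs'.dropWhile (fun y => pvKey y == true)).length ≤ n :=
          le_trans (List.length_dropWhile_le _ _) hlen
        cases hrest : xs'.dropWhile (fun y => pvKey y == true) with
        | nil => rw [pvGroupBy_nil, pvRefT_nil]; rfl
        | cons y rest' =>
          have hy : pvKey y = false := by
            simpa using pvDropWhile_head _ _ _ _ hrest
          rw [pvGroupBy_cons, hy]
          simp only [pvBLoop]
          have hrest2len : (rest'.dropWhile (fun z => pvKey z == false)).length ≤ n := by
            have h1 : rest'.length ≤ n := by
              have := hrestlen; rw [hrest] at this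
              exact le_trans (by simp) this
            exact le_trans (List.length_dropWhile_le _ _) h1
          rw [ih _ hrest2len]
          rw [pvRefT_cons_false _ hy]
          have hall2 : ∀ z ∈ rest'.takeWhile (fun z => pvKey z == false), pvKey z = false := by
            intro z hz; simpa using List.mem_takeWhile_imp hz
          conv_rhs => rw [show pvRefF pvKey rest' = pvRefF pvKey (rest'.takeWhile (fun z => pvKey z == false) ++ rest'.dropWhile (fun z => pvKey z == false)) from by rw [List.takeWhile_append_dropWhile]]
          rw [pvRefF_append_nonkey _ _ _ hall2]
          simp [pvTail4]
-- ===== VERDICT (by name: the statement is the Claim_ definition above) =====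
theorem get_examples_docstring_py_spec : Claim_equal_get_examples_docstring_py := by
  intro lines _
  unfold Spec_get_examples_docstring_py get_examples_docstring_py get_examples_docstring_py_alt
  rw [(pvA_ref lines [] []).2, List.nil_append,
    ← pvB_ref (pvFiltered lines).length (pvFiltered lines) le_rfl]
  rfl
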